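-- pv_equiv track=rewrite | github.com/sueun-dev/open-seed | packages/guard/src/openseed_guard/ci_checker.py | _extract_failure_snippet
-- ===== SOURCE A (Python) =====
-- FAILURE_MARKERS = (
--     "error",
--     "fail",
--     "failed",
--     "traceback",
--     "exception",
--     "assert",
--     "panic",
--     "fatal",
--     "timeout",
--     "segmentation fault",
-- )
--
-- MAX_SNIPPET_LINES = 160
--
-- CONTEXT_LINES = 30
--
-- def _extract_failure_snippet(log: str) -> str:
--     """Extract the most relevant failure snippet from a log."""
--     lines = log.splitlines()
--     if not lines:
--         return ""
--
--     # Find lines containing failure markers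
--     marker_indices: list[int] = []
--     for i, line in enumerate(lines):
--         lower = line.lower()
--         if any(m in lower for m in FAILURE_MARKERS):
--             marker_indices.append(i)
--
--     if not marker_indices:
--         # No markers found — return last N lines
--         return "\n".join(lines[-CONTEXT_LINES:])
--
--     # Take context around the last cluster of markers
--     last_marker = marker_indices[-1]
--     start = max(0, last_marker - CONTEXT_LINES)
--     end = min(len(lines), last_marker + CONTEXT_LINES)
--     snippet_lines = lines[start:end]
--
--     # Cap at MAX_SNIPPET_LINES
--     if len(snippet_lines) > MAX_SNIPPET_LINES:
--         snippet_lines = snippet_lines[-MAX_SNIPPET_LINES:]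
--
--     return "\n".join(snippet_lines)
-- ===== SOURCE B (Python) =====
-- FAILURE_MARKERS = (
--     "error",
--     "fail",
--     "failed",
--     "traceback",
--     "exception",
--     "assert",
--     "panic",
--     "fatal",
--     "timeout",
--     "segmentation fault",
-- )
--
-- MAX_SNIPPET_LINES = 160
--
-- CONTEXT_LINES = 30
--
--
-- def _extract_failure_snippet(log: str) -> str:
--     """Extract the most relevant failure snippet from a log."""
--     lines = log.splitlines()
--     if not lines:
--         return ""
--
--     # Scan backwards and stop at the first (i.e. last) marker line.
--     idx = None
--     for i in range(len(lines) - 1, -1, -1):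
--         low = lines[i].lower()
--         if any(m in low for m in FAILURE_MARKERS):
--             idx = i
--             break
--
--     if idx is None:
--         return "\n".join(lines[-CONTEXT_LINES:])
--
--     start = max(0, idx - CONTEXT_LINES)
--     end = min(len(lines), idx + CONTEXT_LINES)
--     # The window is at most 2*CONTEXT_LINES = 60 lines, always under
--     # MAX_SNIPPET_LINES, so no cap is needed.
--     return "\n".join(lines[start:end])
-- ===== Notes on version B (the rewrite author's own statement) =====
-- stated objective: simpler
-- what changed: B replaces A's collect-all-marker-indices list with a single backward scan that early-exits at the last marker line, and drops A's dead MAX_SNIPPET_LINES cap (the window is at most 60 lines).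
import Mathlib
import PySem

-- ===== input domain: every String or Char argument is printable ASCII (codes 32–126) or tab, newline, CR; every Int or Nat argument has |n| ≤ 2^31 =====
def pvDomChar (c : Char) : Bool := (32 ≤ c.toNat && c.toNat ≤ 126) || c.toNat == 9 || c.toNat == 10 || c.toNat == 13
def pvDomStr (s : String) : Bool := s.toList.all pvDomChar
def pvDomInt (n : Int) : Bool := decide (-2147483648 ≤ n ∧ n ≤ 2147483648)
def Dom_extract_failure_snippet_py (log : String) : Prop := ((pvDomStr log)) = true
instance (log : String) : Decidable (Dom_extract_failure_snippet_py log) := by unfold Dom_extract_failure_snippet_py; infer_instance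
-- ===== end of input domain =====

-- B scans the lines backward and stops at the first hit (the last marker line) instead of
-- collecting every marker index, and drops A's unreachable MAX_SNIPPET_LINES cap; return values are equal.

-- shared module constant FAILURE_MARKERS
def pvFailureMarkers : List String :=
  ["error", "fail", "failed", "traceback", "exception", "assert", "panic", "fatal",
   "timeout", "segmentation fault"]

-- shared marker test: `any(m in line.lower() for m in FAILURE_MARKERS)`
def pvHasMarker (line : String) : Bool :=
  pvFailureMarkers.any (fun m => PySem.Str.isIn m (PySem.Str.lower line))

-- ===== PORT A =====
def extract_failure_snippet_py (log : String) : String :=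
  let lines := PySem.Str.splitlines log
  if lines = [] then ""
  else
    -- for i, line in enumerate(lines): if any marker: marker_indices.append(i)
    let marker_indices : List Int :=
      (PySem.List.enumerate lines 0).foldl
        (fun acc p => if pvHasMarker p.2 then acc ++ [p.1] else acc) []
    if marker_indices = [] then
      PySem.Str.join "\n" (PySem.List.slice lines (some (-(30 : Int))) none)
    else
      let last_marker := PySem.List.pyGetD marker_indices (-1) 0
      let start := max 0 (last_marker - 30)
      let end_ := min (lines.length : Int) (last_marker + 30)
      let snippet_lines := PySem.List.slice lines (some start) (some end_)
      let snippet_lines :=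
        if snippet_lines.length > 160 then
          PySem.List.slice snippet_lines (some (-(160 : Int))) none
        else snippet_lines
      PySem.Str.join "\n" snippet_lines

-- ===== PORT B =====
-- `for i in range(len(lines)-1, -1, -1): if marker: idx = i; break` — countdown scan
def pvRevScan (lines : List String) : Nat → Option Nat
  | 0 => none
  | i + 1 => if pvHasMarker (lines.getD i "") then some i else pvRevScan lines i

def extract_failure_snippet_py_alt (log : String) : String :=
  let lines := PySem.Str.splitlines log
  if lines = [] then ""
  else
    match pvRevScan lines lines.length with
    | none => PySem.Str.join "\n" (PySem.List.slice lines (some (-(30 : Int))) none)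
    | some i =>
      let start := max 0 ((i : Int) - 30)
      let end_ := min (lines.length : Int) ((i : Int) + 30)
      PySem.Str.join "\n" (PySem.List.slice lines (some start) (some end_))

-- ===== PRECONDITION & SPEC =====
def Spec_extract_failure_snippet_py (log : String) (out : String) : Prop := out = extract_failure_snippet_py_alt log
instance (log : String) (out : String) : Decidable (Spec_extract_failure_snippet_py log out) := by unfold Spec_extract_failure_snippet_py; infer_instance

-- ===== CLAIM (what is proved, stated in full; the proofs are below) =====
def Claim_equal_extract_failure_snippet_py : Prop := ∀ (log : String), Dom_extract_failure_snippet_py log → Spec_extract_failure_snippet_py log (extract_failure_snippet_py log)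

-- ===== LEMMAS AND PROOFS =====

-- A's collected marker-index list, after foldl_append_if
def pvMarkerIdxs (lines : List String) : List Int :=
  ((PySem.List.enumerate lines 0).filter (fun p => pvHasMarker p.2)).map (·.1)

theorem pvRevScan_lt (lines : List String) (n i : Nat)
    (h : pvRevScan lines n = some i) : i < n := by
  induction n with
  | zero => simp [pvRevScan] at h
  | succ m ih =>
    unfold pvRevScan at h
    by_cases hp : pvHasMarker (lines[m]?.getD "")
    · simp [hp] at h; omega
    · simp [hp] at h; exact Nat.lt_succ_of_lt (ih h)

theorem pvRevScan_append (lines : List String) (y : String) (n : Nat)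
    (hn : n ≤ lines.length) :
    pvRevScan (lines ++ [y]) n = pvRevScan lines n := by
  induction n with
  | zero => rfl
  | succ m ih =>
    have hm : m < lines.length := by omega
    simp [pvRevScan, List.getD, List.getElem?_append_left hm, ih (by omega)]

theorem pvMarkerIdxs_getLast? (lines : List String) :
    (pvMarkerIdxs lines).getLast? = (pvRevScan lines lines.length).map (fun i => (i : Int)) := by
  induction lines using List.reverseRecOn with
  | nil => rfl
  | append_singleton ys y ih =>
    unfold pvMarkerIdxs at *
    rw [PySem.List.enumerate_append]
    simp only [List.filter_append, List.map_append, List.length_append, List.length_singleton]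
    have hget : (ys ++ [y]).getD ys.length "" = y := by
      simp [List.getD]
    rw [show ys.length + 1 = ys.length + 1 from rfl]
    simp only [pvRevScan, hget, pvRevScan_append ys y ys.length (le_refl _)]
    by_cases hy : pvHasMarker y
    · simp [PySem.List.enumerate, hy]
    · simp [PySem.List.enumerate, hy, ih]

theorem pv_main (lines : List String) :
    (if lines = [] then ""
     else
      let marker_indices : List Int :=
        (PySem.List.enumerate lines 0).foldl
          (fun acc p => if pvHasMarker p.2 then acc ++ [p.1] else acc) []
      if marker_indices = [] then
        PySem.Str.join "\n" (PySem.List.slice lines (some (-(30 : Int))) none)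
      else
        let last_marker := PySem.List.pyGetD marker_indices (-1) 0
        let start := max 0 (last_marker - 30)
        let end_ := min (lines.length : Int) (last_marker + 30)
        let snippet_lines := PySem.List.slice lines (some start) (some end_)
        let snippet_lines :=
          if snippet_lines.length > 160 then
            PySem.List.slice snippet_lines (some (-(160 : Int))) none
          else snippet_lines
        PySem.Str.join "\n" snippet_lines)
    =
    (if lines = [] then ""
     else
      match pvRevScan lines lines.length with
      | none => PySem.Str.join "\n" (PySem.List.slice lines (some (-(30 : Int))) none)
      | some i =>
        let start := max 0 ((i : Int) - 30)
        let end_ := min (lines.length : Int) ((i : Int) + 30)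
        PySem.Str.join "\n" (PySem.List.slice lines (some start) (some end_))) := by
  by_cases hnil : lines = []
  · simp [hnil]
  · simp only [hnil, if_false]
    have hfold :
        (PySem.List.enumerate lines 0).foldl
          (fun acc p => if pvHasMarker p.2 then acc ++ [p.1] else acc) [] = pvMarkerIdxs lines := by
      rw [PySem.List.foldl_append_if (fun q : Int × String => pvHasMarker q.2) (fun q : Int × String => q.1)]
      rfl
    rw [hfold]
    have hlast := pvMarkerIdxs_getLast? lines
    cases hscan : pvRevScan lines lines.length with
    | none =>
      have : pvMarkerIdxs lines = [] := by
        rw [hscan] at hlast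
        exact List.getLast?_eq_none_iff.mp (by simpa using hlast)
      simp [this]
    | some i =>
      rw [hscan] at hlast
      have hne : pvMarkerIdxs lines ≠ [] := by
        intro h; rw [h] at hlast; simp at hlast
      have hi : i < lines.length := pvRevScan_lt _ _ _ hscan
      have hgl : PySem.List.pyGetD (pvMarkerIdxs lines) (-1) 0 = (i : Int) := by
        rw [PySem.List.pyGetD_neg_one (pvMarkerIdxs lines) 0 hne]
        have h1 : some ((pvMarkerIdxs lines).getLast hne) = some (i : Int) := by
          rw [← List.getLast?_eq_some_getLast hne, hlast]; rfl
        exact Option.some_injective _ h1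
      simp only [hne, if_false, hgl]
      -- the cap never fires: the slice has at most 60 < 160 lines
      have hstart : (0 : Int) ≤ max 0 ((i : Int) - 30) := le_max_left _ _
      have hend : (0 : Int) ≤ min (lines.length : Int) ((i : Int) + 30) := by
        have : (0 : Int) ≤ (i : Int) + 30 := by positivity
        omega
      rw [PySem.List.slice_toNat _ hstart hend]
      have hlen : ((lines.drop (max 0 ((i : Int) - 30)).toNat).take
          ((min (lines.length : Int) ((i : Int) + 30)).toNat - (max 0 ((i : Int) - 30)).toNat)).length ≤ 60 := by
        simp only [List.length_take, List.length_drop]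
        omega
      simp only [show ¬ ((lines.drop (max 0 ((i : Int) - 30)).toNat).take
          ((min (lines.length : Int) ((i : Int) + 30)).toNat - (max 0 ((i : Int) - 30)).toNat)).length > 160
        from by omega, if_false]

-- ===== VERDICT (by name: the statement is the Claim_ definition above) =====
theorem extract_failure_snippet_py_spec : Claim_equal_extract_failure_snippet_py := by
  intro log _
  unfold Spec_extract_failure_snippet_py extract_failure_snippet_py extract_failure_snippet_py_alt
  exact pv_main (PySem.Str.splitlines log)
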